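-- pv_equiv track=rewrite | github.com/Kudito98/Codesignal-tasks | code-arcade/126-chessBishopDream/chessBishopDream.py | solution
-- ===== SOURCE A (Python) =====
-- def solution(boardSize, initPosition, initDirection, k):
--     m = boardSize[0]
--     n = boardSize[1]
--     if (m == 1 and n == 1):
--         return [0, 0]
--
--     x = initPosition[0]
--     y = initPosition[1]
--     dx = initDirection[0]
--     dy = initDirection[1]
--     cache = [x, y, dx, dy]
--     while (k > 0):
--         k -= 1
--         x1 = x + dx
--         y1 = y + dy
--         if (x1 < 0 or x1 >= m):
--             x1 = x
--             dx = -dx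
--
--         if (y1 < 0 or y1 >= n):
--             y1 = y
--             dy = -dy
--
--         x = x1
--         y = y1
--         state = [x, y, dx, dy]
--
--         for i in range(len(cache)):
--             if (cache[i] == state):
--                 c = len(cache) - i
--                 r = (k + 1) % c
--                 final_state = cache[i + (r + c - 1) % c]
--                 return [final_state[0], final_state[1]]
--
--         cache.append(state)
--     return [x, y]
-- ===== SOURCE B (Python) =====
-- def _axis(m, x, d, t):
--     # closed-form position of the bouncing coordinate after t >= 0 steps on [0, m)
--     if m <= 0 or d == 0:
--         return x            # every move is rejected (or is a no-op): x never changes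
--     if not (0 <= x < m):
--         # off the board the coordinate is stuck unless a single move lands on it
--         if 0 <= x + d < m and t >= 1:
--             x, t = x + d, t - 1
--         elif not (0 <= x + d < m) and 0 <= x - d < m and t >= 2:
--             x, d, t = x - d, -d, t - 2
--         else:
--             return x
--     # reachable cells form the progression a, a+s, ..., a+(L-1)*s inside [0, m);
--     # on cell indices the motion is a triangular wave of period 2L
--     s = abs(d)
--     a = x % s
--     L = (m - 1 - a) // s + 1
--     i = (x - a) // s
--     virt = i if d > 0 else 2 * L - 1 - i
--     v = (virt + t) % (2 * L)
--     idx = v if v < L else 2 * L - 1 - v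
--     return a + idx * s
--
-- def solution(boardSize, initPosition, initDirection, k):
--     if boardSize[0] == 1 and boardSize[1] == 1:
--         return [0, 0]       # a 1x1 board has a single cell
--     steps = max(k, 0)
--     return [_axis(boardSize[0], initPosition[0], initDirection[0], steps),
--             _axis(boardSize[1], initPosition[1], initDirection[1], steps)]
-- ===== Notes on version B (the rewrite author's own statement) =====
-- stated objective: alternative
-- what changed: Replaced the step-by-step simulation with cycle detection (a growing cache scanned on every step) by a closed-form triangular-wave reflection formula applied independently to each axis (with an O(1) entry phase for off-board starts).
import Mathlib
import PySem

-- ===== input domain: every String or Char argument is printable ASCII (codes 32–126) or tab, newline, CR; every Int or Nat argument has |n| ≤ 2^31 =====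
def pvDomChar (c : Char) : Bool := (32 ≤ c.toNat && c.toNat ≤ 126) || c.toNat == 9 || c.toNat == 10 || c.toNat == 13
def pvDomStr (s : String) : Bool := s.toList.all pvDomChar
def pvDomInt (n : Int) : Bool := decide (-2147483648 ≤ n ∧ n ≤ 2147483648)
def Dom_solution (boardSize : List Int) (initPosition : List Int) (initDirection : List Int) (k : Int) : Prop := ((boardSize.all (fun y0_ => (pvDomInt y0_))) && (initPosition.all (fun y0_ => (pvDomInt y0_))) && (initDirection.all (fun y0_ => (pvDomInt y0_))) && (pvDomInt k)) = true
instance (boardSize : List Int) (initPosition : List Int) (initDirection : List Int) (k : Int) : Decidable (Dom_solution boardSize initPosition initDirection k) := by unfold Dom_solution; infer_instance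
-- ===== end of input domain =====

-- B replaces A's step-by-step simulation with cycle detection by a closed-form
-- triangular-wave reflection formula per axis (objective: alternative; same values, different algorithm).


-- ===== PORT A =====
-- A's cache is a heterogeneous Python list: 4 ints followed by 4-element state lists;
-- we model its elements as `Int ⊕ List Int`.
def pvEqState : (Int ⊕ List Int) → List Int → Bool
  | Sum.inl _, _ => false          -- Python: int == list is False
  | Sum.inr l, s => l == s

-- first index i with cache[i] == state (A's inner `for i in range(len(cache))` scan)
def pvFind : List (Int ⊕ List Int) → List Int → Option Nat
  | [], _ => none
  | e :: rest, s => if pvEqState e s then some 0 else (pvFind rest s).map (· + 1)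

-- A's `while (k > 0)` loop; fuel = number of remaining iterations (= k when k ≥ 0)
def pvLoopA (m n : Int) : Nat → Int → Int → Int → Int → Int → List (Int ⊕ List Int) → List Int
  | 0, _, x, y, _, _, _ => [x, y]
  | fuel + 1, k0, x, y, dx, dy, cache =>
    let k := k0 - 1
    let x1 := x + dx
    let y1 := y + dy
    let xdx := if x1 < 0 ∨ x1 ≥ m then (x, -dx) else (x1, dx)
    let ydy := if y1 < 0 ∨ y1 ≥ n then (y, -dy) else (y1, dy)
    let x := xdx.1
    let dx := xdx.2
    let y := ydy.1
    let dy := ydy.2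
    let state : List Int := [x, y, dx, dy]
    match pvFind cache state with
    | some i =>
      let c : Int := (cache.length : Int) - (i : Int)
      let r := PySem.Int.mod (k + 1) c
      match PySem.List.pyGet? cache ((i : Int) + PySem.Int.mod (r + c - 1) c) with
      | some (Sum.inr fs) => [(PySem.List.pyGet? fs 0).getD 0, (PySem.List.pyGet? fs 1).getD 0]
      | _ => []   -- Python raises (TypeError/IndexError) here; unreachable
    | none => pvLoopA m n fuel k x y dx dy (cache ++ [Sum.inr state])

def solution (boardSize : List Int) (initPosition : List Int) (initDirection : List Int) (k : Int) : List Int :=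
  let m := (PySem.List.pyGet? boardSize 0).getD 0
  let n := (PySem.List.pyGet? boardSize 1).getD 0
  if m = 1 ∧ n = 1 then [0, 0] else
  let x := (PySem.List.pyGet? initPosition 0).getD 0
  let y := (PySem.List.pyGet? initPosition 1).getD 0
  let dx := (PySem.List.pyGet? initDirection 0).getD 0
  let dy := (PySem.List.pyGet? initDirection 1).getD 0
  pvLoopA m n k.toNat k x y dx dy [Sum.inl x, Sum.inl y, Sum.inl dx, Sum.inl dy]

-- ===== PORT B =====
-- in-range core of Source B's _axis: triangular wave on the arithmetic progression of cells
def pvAxisCore (m x d t : Int) : Int :=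
  let s := |d|
  let a := PySem.Int.mod x s
  let L := PySem.Int.floordiv (m - 1 - a) s + 1
  let i := PySem.Int.floordiv (x - a) s
  let virt := if d > 0 then i else 2 * L - 1 - i
  let v := PySem.Int.mod (virt + t) (2 * L)
  let idx := if v < L then v else 2 * L - 1 - v
  a + idx * s

-- Source B's _axis: the if/elif/else entry phase, then the core
def pvAxisB (m x d t : Int) : Int :=
  if m ≤ 0 ∨ d = 0 then x
  else
    match (if 0 ≤ x ∧ x < m then some (x, d, t)
           else if (0 ≤ x + d ∧ x + d < m) ∧ 1 ≤ t then some (x + d, d, t - 1)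
           else if ¬(0 ≤ x + d ∧ x + d < m) ∧ (0 ≤ x - d ∧ x - d < m) ∧ 2 ≤ t then some (x - d, -d, t - 2)
           else none) with
    | none => x
    | some (x', d', t') => pvAxisCore m x' d' t'

def solution_alt (boardSize : List Int) (initPosition : List Int) (initDirection : List Int) (k : Int) : List Int :=
  if ((PySem.List.pyGet? boardSize 0).getD 0 = 1 ∧ (PySem.List.pyGet? boardSize 1).getD 0 = 1) then [0, 0] else
  let steps := max k 0
  [pvAxisB ((PySem.List.pyGet? boardSize 0).getD 0) ((PySem.List.pyGet? initPosition 0).getD 0)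
           ((PySem.List.pyGet? initDirection 0).getD 0) steps,
   pvAxisB ((PySem.List.pyGet? boardSize 1).getD 0) ((PySem.List.pyGet? initPosition 1).getD 0)
           ((PySem.List.pyGet? initDirection 1).getD 0) steps]

-- ===== PRECONDITION & SPEC =====
-- Pre_ excludes exactly the inputs on which A raises IndexError: boardSize shorter than 2, or
-- (except on a 1x1 board, where A returns [0,0] before reading them) a position or direction
-- list shorter than 2.
def Pre_solution (boardSize : List Int) (initPosition : List Int) (initDirection : List Int) (k : Int) : Prop :=
  2 ≤ boardSize.length ∧
    ((boardSize.getD 0 0 = 1 ∧ boardSize.getD 1 0 = 1) ∨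
      (2 ≤ initPosition.length ∧ 2 ≤ initDirection.length))
instance (boardSize : List Int) (initPosition : List Int) (initDirection : List Int) (k : Int) : Decidable (Pre_solution boardSize initPosition initDirection k) := by unfold Pre_solution; infer_instance

def pvWitness_solution : List Int × List Int × List Int × Int := ([3, 3], [1, 1], [1, 1], 5)

def Spec_solution (boardSize : List Int) (initPosition : List Int) (initDirection : List Int) (k : Int) (out : List Int) : Prop := out = solution_alt boardSize initPosition initDirection k
instance (boardSize : List Int) (initPosition : List Int) (initDirection : List Int) (k : Int) (out : List Int) : Decidable (Spec_solution boardSize initPosition initDirection k out) := by unfold Spec_solution; infer_instance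

-- ===== CLAIM (what is proved, stated in full; the proofs are below) =====
def Claim_equal_solution : Prop := ∀ (boardSize : List Int) (initPosition : List Int) (initDirection : List Int) (k : Int), Dom_solution boardSize initPosition initDirection k → Pre_solution boardSize initPosition initDirection k → Spec_solution boardSize initPosition initDirection k (solution boardSize initPosition initDirection k)

-- ===== LEMMAS AND PROOFS =====

-- one axis step of A's simulation as a function on (position, direction)
def pvStep (m : Int) (p : Int × Int) : Int × Int :=
  if p.1 + p.2 < 0 ∨ p.1 + p.2 ≥ m then (p.1, -p.2) else (p.1 + p.2, p.2)

-- the axis state after t steps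
def pvX (m x d : Int) (t : Nat) : Int × Int := (pvStep m)^[t] (x, d)

-- the full state list [x, y, dx, dy] after t steps
def pvSt (m n x y dx dy : Int) (t : Nat) : List Int :=
  [(pvX m x dx t).1, (pvX n y dy t).1, (pvX m x dx t).2, (pvX n y dy t).2]

lemma pvFind_some {cc : List (Int ⊕ List Int)} {s : List Int} {i : Nat}
    (h : pvFind cc s = some i) : i < cc.length ∧ pvEqState cc[i]! s = true := by
  induction cc generalizing i with
  | nil => simp [pvFind] at h
  | cons e rest ih =>
    simp only [pvFind] at h
    split_ifs at h with he
    · cases h; simpa using he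
    · cases hr : pvFind rest s with
      | none => simp [hr] at h
      | some j =>
        simp [hr] at h
        obtain ⟨hj, he2⟩ := ih hr
        subst h
        constructor
        · simpa using Nat.succ_lt_succ hj
        · simpa [List.getElem!_cons_succ] using he2

lemma pv_mod_shift (f c : Int) (hc : 0 < c) :
    PySem.Int.mod (PySem.Int.mod (f + 1) c + c - 1) c = PySem.Int.mod f c := by
  simp only [PySem.Int.mod_eq_emod_of_pos hc]
  rw [add_sub_assoc, Int.emod_add_emod, show f + 1 + (c - 1) = f + c by ring, Int.add_emod_right]

-- once a state recurs, the whole trajectory is periodic from that point on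
lemma pv_iter_periodic {α : Type} (f : α → α) (z : α) (a c : Nat) (hc : 0 < c)
    (h : f^[a + c] z = f^[a] z) : ∀ b, f^[a + b] z = f^[a + b % c] z := by
  intro b
  induction b using Nat.strong_induction_on with
  | _ b ih =>
    by_cases hb : b < c
    · rw [Nat.mod_eq_of_lt hb]
    · have e1 : a + b = (b - c) + (a + c) := by omega
      rw [e1, Function.iterate_add_apply, h, ← Function.iterate_add_apply]
      have e2 : (b - c) + a = a + (b - c) := by omega
      rw [e2, ih (b - c) (by omega)]
      have e3 : b % c = (b - c) % c := by
        conv_lhs => rw [show b = c + (b - c) by omega]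
        rw [Nat.add_mod_left]
      rw [e3]

-- the main loop invariant: A's loop computes the iterated step, cycle shortcut included
lemma pvLoopA_eq (m n x y dx dy : Int) (a0 a1 a2 a3 : Int) :
    ∀ (fuel t : Nat),
      pvLoopA m n fuel (fuel : Int)
        (pvX m x dx t).1 (pvX n y dy t).1 (pvX m x dx t).2 (pvX n y dy t).2
        ([Sum.inl a0, Sum.inl a1, Sum.inl a2, Sum.inl a3] ++
          (List.range t).map (fun j => Sum.inr (pvSt m n x y dx dy (j + 1))))
      = [(pvX m x dx (t + fuel)).1, (pvX n y dy (t + fuel)).1] := by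
  intro fuel
  induction fuel with
  | zero => intro t; simp [pvLoopA]
  | succ f ih =>
    intro t
    have hxstep : (if (pvX m x dx t).1 + (pvX m x dx t).2 < 0 ∨ (pvX m x dx t).1 + (pvX m x dx t).2 ≥ m
        then ((pvX m x dx t).1, -(pvX m x dx t).2)
        else ((pvX m x dx t).1 + (pvX m x dx t).2, (pvX m x dx t).2)) = pvX m x dx (t + 1) := by
      rw [pvX, pvX, Function.iterate_succ_apply']; rfl
    have hystep : (if (pvX n y dy t).1 + (pvX n y dy t).2 < 0 ∨ (pvX n y dy t).1 + (pvX n y dy t).2 ≥ n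
        then ((pvX n y dy t).1, -(pvX n y dy t).2)
        else ((pvX n y dy t).1 + (pvX n y dy t).2, (pvX n y dy t).2)) = pvX n y dy (t + 1) := by
      rw [pvX, pvX, Function.iterate_succ_apply']; rfl
    simp only [pvLoopA]
    rw [hxstep, hystep]
    have hst : ([(pvX m x dx (t + 1)).1, (pvX n y dy (t + 1)).1,
          (pvX m x dx (t + 1)).2, (pvX n y dy (t + 1)).2] : List Int)
        = pvSt m n x y dx dy (t + 1) := rfl
    rw [hst]
    have hk : ((((f : Nat) + 1 : Nat)) : Int) - 1 + 1 = (f : Int) + 1 := by push_cast; ring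
    cases hfind : pvFind
        ([Sum.inl a0, Sum.inl a1, Sum.inl a2, Sum.inl a3] ++
          List.map (fun j => Sum.inr (pvSt m n x y dx dy (j + 1))) (List.range t))
        (pvSt m n x y dx dy (t + 1)) with
    | none =>
      have hk' : ((((f : Nat) + 1 : Nat)) : Int) - 1 = (f : Int) := by push_cast; ring
      rw [hk', List.append_assoc, show (List.map (fun j => Sum.inr (pvSt m n x y dx dy (j + 1))) (List.range t) : List (Int ⊕ List Int)) ++ [Sum.inr (pvSt m n x y dx dy (t + 1))] = List.map (fun j => Sum.inr (pvSt m n x y dx dy (j + 1))) (List.range (t + 1)) by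
          rw [List.range_succ, List.map_append]; simp]
      rw [ih (t + 1), show t + 1 + f = t + (f + 1) from by omega]
    | some i =>
      obtain ⟨hi_len, hi_match⟩ := pvFind_some hfind
      simp only [List.length_append, List.length_cons, List.length_nil, List.length_map,
        List.length_range] at hi_len ⊢
      have h4 : 4 ≤ i := by
        by_contra hlt
        interval_cases i <;> simp [pvEqState] at hi_match
      obtain ⟨j, rfl⟩ : ∃ j, i = 4 + j := ⟨i - 4, by omega⟩
      have hjt : j < t := by omega
      have hel : ([Sum.inl a0, Sum.inl a1, Sum.inl a2, Sum.inl a3] ++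
          List.map (fun j => Sum.inr (pvSt m n x y dx dy (j + 1))) (List.range t))[4 + j]!
          = Sum.inr (pvSt m n x y dx dy (j + 1)) := by
        rw [getElem!_pos _ _ (by simpa using by omega)]
        rw [List.getElem_append_right (by simp)]
        simp
      rw [hel] at hi_match
      have hse : pvSt m n x y dx dy (j + 1) = pvSt m n x y dx dy (t + 1) := by
        simpa [pvEqState] using hi_match
      simp only [pvSt, List.cons.injEq, and_true] at hse
      have hXe : pvX m x dx (j + 1) = pvX m x dx (t + 1) := Prod.ext hse.1 hse.2.2.1
      have hYe : pvX n y dy (j + 1) = pvX n y dy (t + 1) := Prod.ext hse.2.1 hse.2.2.2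
      rw [show ((0 + 1 + 1 + 1 + 1 + t : Nat) : Int) - ((4 + j : Nat) : Int) = ((t - j : Nat) : Int) by
        push_cast [Nat.cast_sub (Nat.le_of_lt hjt)]; ring]
      have hcpos : (0 : Int) < ((t - j : Nat) : Int) := by
        have : 0 < t - j := by omega
        exact_mod_cast this
      rw [hk, pv_mod_shift _ _ hcpos, PySem.Int.mod_natCast]
      have hidx : ((4 + j : Nat) : Int) + ((f % (t - j) : Nat) : Int)
          = ((4 + j + f % (t - j) : Nat) : Int) := by push_cast; ring
      rw [hidx, PySem.List.pyGet?_natCast]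
      have hmlt : f % (t - j) < t - j := Nat.mod_lt _ (by omega)
      have hlt : 4 + j + f % (t - j)
          < ([Sum.inl a0, Sum.inl a1, Sum.inl a2, Sum.inl a3] ++
             List.map (fun j => Sum.inr (pvSt m n x y dx dy (j + 1))) (List.range t)).length := by
        simp only [List.length_append, List.length_cons, List.length_nil, List.length_map,
          List.length_range]
        omega
      rw [List.getElem?_eq_getElem hlt]
      rw [List.getElem_append_right (by simp only [List.length_cons, List.length_nil]; omega)]
      simp only [List.length_cons, List.length_nil, List.getElem_map, List.getElem_range]
      -- the cycle arithmetic: state (j + f%(t-j) + 1) equals state (t + (f+1))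
      have hperX : pvX m x dx ((j + 1) + (t - j)) = pvX m x dx (j + 1) := by
        rw [show (j + 1) + (t - j) = t + 1 by omega]; exact hXe.symm
      have hperY : pvX n y dy ((j + 1) + (t - j)) = pvX n y dy (j + 1) := by
        rw [show (j + 1) + (t - j) = t + 1 by omega]; exact hYe.symm
      have hfinX : pvX m x dx (t + (f + 1)) = pvX m x dx (j + f % (t - j) + 1) := by
        simp only [pvX]
        have h1 := pv_iter_periodic (pvStep m) (x, dx) (j + 1) (t - j) (by omega)
          (by simpa only [pvX] using hperX) ((t - j) + f)
        rw [show (j + 1) + ((t - j) + f) = t + (f + 1) by omega, Nat.add_mod_left] at h1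
        rw [h1, show (j + 1) + f % (t - j) = j + f % (t - j) + 1 by omega]
      have hfinY : pvX n y dy (t + (f + 1)) = pvX n y dy (j + f % (t - j) + 1) := by
        simp only [pvX]
        have h1 := pv_iter_periodic (pvStep n) (y, dy) (j + 1) (t - j) (by omega)
          (by simpa only [pvX] using hperY) ((t - j) + f)
        rw [show (j + 1) + ((t - j) + f) = t + (f + 1) by omega, Nat.add_mod_left] at h1
        rw [h1, show (j + 1) + f % (t - j) = j + f % (t - j) + 1 by omega]
      rw [show 4 + j + f % (t - j) - (0 + 1 + 1 + 1 + 1) = j + f % (t - j) by omega]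
      rw [pvSt, hfinX, hfinY]
      rfl

-- degenerate axes: the position never moves
lemma pv_iter_fst_const (m x : Int) (hstep : ∀ e : Int, (pvStep m (x, e)).1 = x) :
    ∀ (t : Nat) (e : Int), ((pvStep m)^[t] (x, e)).1 = x := by
  intro t
  induction t with
  | zero => intro e; rfl
  | succ t ih =>
    intro e
    rw [Function.iterate_succ_apply]
    have h1 : pvStep m (x, e) = (x, (pvStep m (x, e)).2) := by
      have := hstep e
      exact Prod.ext this rfl
    rw [h1]
    exact ih _

-- triangular-wave machinery for the in-range case (unit cell index)
def pvFold (L v : Int) : Int := if v < L then v else 2 * L - 1 - v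
def pvDir (L v : Int) : Int := if v < L then 1 else -1
def pvV (L v0 : Int) (t : Nat) : Int := PySem.Int.mod (v0 + (t : Int)) (2 * L)

lemma pvV_bounds (L v0 : Int) (hL : 1 ≤ L) (t : Nat) : 0 ≤ pvV L v0 t ∧ pvV L v0 t < 2 * L :=
  ⟨PySem.Int.mod_nonneg _ (by omega), PySem.Int.mod_lt _ (by omega)⟩

lemma pvV_zero (L v0 : Int) (h0 : 0 ≤ v0) (h1 : v0 < 2 * L) : pvV L v0 0 = v0 := by
  simp [pvV, PySem.Int.mod_eq_emod_of_pos (by omega : (0:Int) < 2*L)]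
  exact Int.emod_eq_of_lt h0 h1

lemma pvV_succ (L v0 : Int) (hL : 1 ≤ L) (t : Nat) :
    pvV L v0 (t + 1) = PySem.Int.mod (pvV L v0 t + 1) (2 * L) := by
  have h2 : (0:Int) < 2 * L := by omega
  simp only [pvV, PySem.Int.mod_eq_emod_of_pos h2]
  push_cast
  rw [← add_assoc, ← Int.emod_add_emod]

-- one unit-cell step in closed form
lemma pv_axis_step (L v : Int) (hL : 1 ≤ L) (h0 : 0 ≤ v) (h1 : v < 2 * L) :
    pvStep L (pvFold L v, pvDir L v)
    = (pvFold L (PySem.Int.mod (v + 1) (2 * L)), pvDir L (PySem.Int.mod (v + 1) (2 * L))) := by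
  have h2 : (0:Int) < 2 * L := by omega
  have hv' : PySem.Int.mod (v + 1) (2 * L) = if v + 1 < 2 * L then v + 1 else 0 := by
    rw [PySem.Int.mod_eq_emod_of_pos h2]
    split_ifs with h
    · exact Int.emod_eq_of_lt (by omega) h
    · have : v + 1 = 2 * L := by omega
      simp [this]
  rw [hv']
  unfold pvStep pvFold pvDir
  split_ifs <;> simp_all <;> omega

-- conjugation: a step on the board is a step on cell indices
lemma pv_conj_step (m a s L : Int) (hs : 1 ≤ s) (ha0 : 0 ≤ a) (has : a < s)
    (hw1 : a + (L - 1) * s < m) (hw2 : m ≤ a + L * s) (i e : Int)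
    (hi0 : 0 ≤ i) (hiL : i < L) (he : e = 1 ∨ e = -1) :
    pvStep m (a + i * s, e * s) = (a + (pvStep L (i, e)).1 * s, (pvStep L (i, e)).2 * s) := by
  have hkey : (a + i * s + e * s < 0 ∨ a + i * s + e * s ≥ m) ↔ (i + e < 0 ∨ i + e ≥ L) := by
    constructor
    · intro h
      by_contra hc
      push_neg at hc
      have hb0 : 0 ≤ (i + e) * s := mul_nonneg (by omega) (by omega)
      have hb1 : (i + e) * s ≤ (L - 1) * s := mul_le_mul_of_nonneg_right (by omega) (by omega)
      have : a + i * s + e * s = a + (i + e) * s := by ring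
      omega
    · intro h
      rcases he with he | he <;> subst he <;> rcases h with h | h
      · omega
      · have : i = L - 1 := by omega
        subst this
        have : a + (L - 1) * s + 1 * s = a + L * s := by ring
        omega
      · have : i = 0 := by omega
        subst this
        have : a + 0 * s + -1 * s = a - s := by ring
        omega
      · omega
  unfold pvStep
  simp only []
  by_cases hc : i + e < 0 ∨ i + e ≥ L
  · rw [if_pos (hkey.mpr hc), if_pos hc]
    simp only [Prod.mk.injEq]
    refine ⟨?_, ?_⟩ <;> first | trivial | ring
  · rw [if_neg (fun h => hc (hkey.mp h)), if_neg hc]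
    simp only [Prod.mk.injEq]
    refine ⟨?_, ?_⟩ <;> first | trivial | ring

-- the in-range trajectory in closed form
lemma pv_inrange (m a s L virt : Int) (hs : 1 ≤ s) (ha0 : 0 ≤ a) (has : a < s) (hL : 1 ≤ L)
    (hw1 : a + (L - 1) * s < m) (hw2 : m ≤ a + L * s) (h0 : 0 ≤ virt) (h1 : virt < 2 * L) :
    ∀ t : Nat, (pvStep m)^[t] (a + pvFold L virt * s, pvDir L virt * s)
      = (a + pvFold L (pvV L virt t) * s, pvDir L (pvV L virt t) * s) := by
  intro t
  induction t with
  | zero => rw [pvV_zero _ _ h0 h1]; rfl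
  | succ t ih =>
    rw [Function.iterate_succ_apply', ih]
    have hb := pvV_bounds L virt hL t
    have hfb : 0 ≤ pvFold L (pvV L virt t) ∧ pvFold L (pvV L virt t) < L := by
      unfold pvFold; split_ifs <;> omega
    have hdb : pvDir L (pvV L virt t) = 1 ∨ pvDir L (pvV L virt t) = -1 := by
      unfold pvDir; split_ifs <;> simp
    rw [pv_conj_step m a s L hs ha0 has hw1 hw2 _ _ hfb.1 hfb.2 hdb]
    rw [pv_axis_step L _ hL hb.1 hb.2, pvV_succ L virt hL t]

-- Source B's core formula equals the iterated step, for an in-range start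
lemma pvAxisCore_eq (m x d : Int) (hm : 1 ≤ m) (hd : d ≠ 0) (hx0 : 0 ≤ x) (hx1 : x < m)
    (t : Nat) : pvAxisCore m x d (t : Int) = ((pvStep m)^[t] (x, d)).1 := by
  have hs : (1:Int) ≤ |d| := by rcases lt_or_gt_of_ne hd with h | h <;> rw [abs] <;> omega
  have hspos : (0:Int) < |d| := by omega
  set s := |d| with hsdef
  set a := PySem.Int.mod x s with hadef
  set L := PySem.Int.floordiv (m - 1 - a) s + 1 with hLdef
  set i := PySem.Int.floordiv (x - a) s with hidef
  have ha0 : 0 ≤ a := PySem.Int.mod_nonneg _ hspos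
  have has : a < s := PySem.Int.mod_lt _ hspos
  have hxas : x = PySem.Int.floordiv x s * s + a := (PySem.Int.floordiv_mul_add_mod x s).symm
  have hie : i = PySem.Int.floordiv x s := by
    rw [hidef, show x - a = PySem.Int.floordiv x s * s by omega]
    rw [PySem.Int.floordiv_eq_ediv_of_pos hspos, Int.mul_ediv_cancel _ (by omega)]
  have hxai : x = a + i * s := by rw [hie]; omega
  have hfd0 : 0 ≤ PySem.Int.floordiv x s * s :=
    mul_nonneg (by rw [PySem.Int.floordiv_eq_ediv_of_pos hspos]; exact Int.ediv_nonneg hx0 (by omega)) (by omega)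
  have ham : a ≤ m - 1 := by omega
  have hLf : PySem.Int.floordiv (m - 1 - a) s * s + PySem.Int.mod (m - 1 - a) s = m - 1 - a :=
    PySem.Int.floordiv_mul_add_mod (m - 1 - a) s
  have hmod0 : 0 ≤ PySem.Int.mod (m - 1 - a) s := PySem.Int.mod_nonneg _ hspos
  have hmods : PySem.Int.mod (m - 1 - a) s < s := PySem.Int.mod_lt _ hspos
  have hL1 : 1 ≤ L := by
    rw [hLdef]
    have : 0 ≤ PySem.Int.floordiv (m - 1 - a) s := by
      rw [PySem.Int.floordiv_eq_ediv_of_pos hspos]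
      exact Int.ediv_nonneg (by omega) (by omega)
    omega
  have hw1 : a + (L - 1) * s < m := by
    have h1 : (L - 1) * s = PySem.Int.floordiv (m - 1 - a) s * s := by rw [hLdef]; ring
    rw [h1]
    omega
  have hw2 : m ≤ a + L * s := by
    have h1 : L * s = PySem.Int.floordiv (m - 1 - a) s * s + s := by rw [hLdef]; ring
    rw [h1]
    omega
  have hi0 : 0 ≤ i := by
    rw [hie, PySem.Int.floordiv_eq_ediv_of_pos hspos]
    exact Int.ediv_nonneg (by omega) (by omega)
  have hiL : i < L := by
    by_contra hc
    push_neg at hc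
    have : L * s ≤ i * s := mul_le_mul_of_nonneg_right hc (by omega)
    omega
  have hvirt0 : 0 ≤ (if d > 0 then i else 2 * L - 1 - i) := by split_ifs <;> omega
  have hvirt1 : (if d > 0 then i else 2 * L - 1 - i) < 2 * L := by split_ifs <;> omega
  have hstart : (x, d) = (a + pvFold L (if d > 0 then i else 2 * L - 1 - i) * s,
      pvDir L (if d > 0 then i else 2 * L - 1 - i) * s) := by
    unfold pvFold pvDir
    by_cases hdp : d > 0
    · simp only [if_pos hdp, if_pos (by omega : i < L), Prod.mk.injEq]
      refine ⟨by omega, ?_⟩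
      rw [one_mul, hsdef, abs_of_pos hdp]
    · simp only [if_neg hdp, if_neg (by omega : ¬(2 * L - 1 - i < L)), Prod.mk.injEq]
      refine ⟨?_, ?_⟩
      · have h2 : 2 * L - 1 - (2 * L - 1 - i) = i := by ring
        rw [h2]; omega
      · rw [neg_one_mul, hsdef, abs_of_neg (by omega), neg_neg]
  unfold pvAxisCore
  simp only [← hsdef, ← hadef, ← hLdef, ← hidef]
  rw [show ((x, d) : Int × Int) = _ from hstart,
    pv_inrange m a s L _ hs ha0 has hL1 hw1 hw2 hvirt0 hvirt1 t]
  unfold pvFold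
  rfl

-- off the board with both neighbours off too: the piece just flips direction forever
lemma pv_stuck (m x d : Int) (h1 : x + d < 0 ∨ x + d ≥ m) (h2 : x - d < 0 ∨ x - d ≥ m) :
    ∀ t : Nat, (pvStep m)^[t] (x, d) = (x, d) ∨ (pvStep m)^[t] (x, d) = (x, -d) := by
  intro t
  induction t with
  | zero => left; rfl
  | succ t ih =>
    rw [Function.iterate_succ_apply']
    rcases ih with h | h <;> rw [h] <;> unfold pvStep
    · right
      rw [if_pos (by simp only []; omega)]
    · left
      rw [if_pos (by simp only []; omega)]
      simp

-- Source B's _axis equals the iterated step on every input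
lemma pvAxisB_eq (m x d : Int) (K : Nat) :
    pvAxisB m x d ((K : Nat) : Int) = ((pvStep m)^[K] (x, d)).1 := by
  unfold pvAxisB
  by_cases hdeg : m ≤ 0 ∨ d = 0
  · rw [if_pos hdeg]
    rcases hdeg with hm | hd
    · refine (pv_iter_fst_const m x ?_ K d).symm
      intro e
      unfold pvStep
      rw [if_pos (by simp only []; omega)]
    · subst hd
      have hfix : pvStep m (x, 0) = (x, 0) := by
        unfold pvStep
        split_ifs <;> simp
      rw [Function.iterate_fixed hfix]
  · rw [if_neg hdeg]
    push_neg at hdeg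
    obtain ⟨hm0, hd0⟩ := hdeg
    by_cases hin : 0 ≤ x ∧ x < m
    · rw [if_pos hin]
      show pvAxisCore m x d ((K : Nat) : Int) = _
      exact pvAxisCore_eq m x d (by omega) hd0 hin.1 hin.2 K
    · rw [if_neg hin]
      by_cases hc1 : (0 ≤ x + d ∧ x + d < m) ∧ 1 ≤ ((K : Nat) : Int)
      · rw [if_pos hc1]
        show pvAxisCore m (x + d) d (((K : Nat) : Int) - 1) = _
        have hK1 : 1 ≤ K := by exact_mod_cast hc1.2
        have he : ((K : Nat) : Int) - 1 = ((K - 1 : Nat) : Int) := by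
          push_cast [Nat.cast_sub hK1]; ring
        rw [he, pvAxisCore_eq m (x + d) d (by omega) hd0 hc1.1.1 hc1.1.2 (K - 1)]
        rw [show K = (K - 1) + 1 by omega, Function.iterate_succ_apply]
        have hstep1 : pvStep m (x, d) = (x + d, d) := by
          unfold pvStep
          rw [if_neg (by simp only []; omega)]
        rw [hstep1, Nat.add_sub_cancel]
      · rw [if_neg hc1]
        by_cases hc2 : ¬(0 ≤ x + d ∧ x + d < m) ∧ (0 ≤ x - d ∧ x - d < m) ∧ 2 ≤ ((K : Nat) : Int)
        · rw [if_pos hc2]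
          show pvAxisCore m (x - d) (-d) (((K : Nat) : Int) - 2) = _
          have hK2 : 2 ≤ K := by exact_mod_cast hc2.2.2
          have he : ((K : Nat) : Int) - 2 = ((K - 2 : Nat) : Int) := by
            push_cast [Nat.cast_sub hK2]; ring
          rw [he, pvAxisCore_eq m (x - d) (-d) (by omega) (by omega) hc2.2.1.1 hc2.2.1.2 (K - 2)]
          rw [show K = (K - 2) + 1 + 1 by omega, Function.iterate_succ_apply,
            Function.iterate_succ_apply]
          have hstep1 : pvStep m (x, d) = (x, -d) := by
            unfold pvStep
            rw [if_pos (by simp only []; omega)]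
          have hstep2 : pvStep m (x, -d) = (x - d, -d) := by
            unfold pvStep
            rw [if_neg (by simp only []; omega)]
            simp only [Prod.mk.injEq]
            exact ⟨by ring, trivial⟩
          rw [hstep1, hstep2, show K - 2 + 1 + 1 - 2 = K - 2 from by omega]
        · rw [if_neg hc2]
          show x = _
          by_cases hxd : 0 ≤ x + d ∧ x + d < m
          · have hK0 : K = 0 := by
              have : ¬(1 ≤ ((K : Nat) : Int)) := fun h => hc1 ⟨hxd, h⟩
              omega
            subst hK0; rfl
          · by_cases hxd2 : 0 ≤ x - d ∧ x - d < m
            · have hK1 : K ≤ 1 := by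
                have : ¬(2 ≤ ((K : Nat) : Int)) := fun h => hc2 ⟨hxd, hxd2, h⟩
                omega
              match K, hK1 with
              | 0, _ => rfl
              | 1, _ =>
                rw [Function.iterate_one]
                unfold pvStep
                rw [if_pos (by simp only []; omega)]
            · rcases pv_stuck m x d (by omega) (by omega) K with h | h <;> rw [h]

lemma pv_get0 (a b : Int) (l : List Int) : (PySem.List.pyGet? (a :: b :: l) 0).getD 0 = a := by
  rw [PySem.List.pyGet?_zero_cons]; rfl

lemma pv_get1 (a b : Int) (l : List Int) : (PySem.List.pyGet? (a :: b :: l) 1).getD 0 = b := by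
  rw [show (1:Int) = ((1:Nat):Int) from rfl, PySem.List.pyGet?_natCast]; rfl

-- ===== VERDICT (by name: the statement is the Claim_ definition above) =====
theorem solution_spec : Claim_equal_solution := by
  intro boardSize initPosition initDirection k _hdom hpre
  obtain ⟨hb, hrest⟩ := hpre
  match boardSize, hb with
  | m0 :: n0 :: bs, _ =>
  show solution _ _ _ _ = _
  unfold solution solution_alt
  simp only [pv_get0, pv_get1]
  by_cases h11 : m0 = 1 ∧ n0 = 1
  · rw [if_pos h11, if_pos h11]
  · rw [if_neg h11, if_neg h11]
    have hpd : 2 ≤ initPosition.length ∧ 2 ≤ initDirection.length := by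
      rcases hrest with h | h
      · exact absurd ⟨by simpa using h.1, by simpa using h.2⟩ h11
      · exact h
    match initPosition, hpd.1 with
    | x0 :: y0 :: ps, _ =>
    match initDirection, hpd.2 with
    | dx0 :: dy0 :: ds, _ =>
    simp only [pv_get0, pv_get1]
    have hmax : max k 0 = ((k.toNat : Nat) : Int) := (Int.toNat_eq_max k).symm
    rcases (by omega : k < 0 ∨ 0 ≤ k) with hk | hk
    · have h0 : k.toNat = 0 := by omega
      rw [h0, hmax, h0]
      rw [pvAxisB_eq m0 x0 dx0 0, pvAxisB_eq n0 y0 dy0 0]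
      rfl
    · have hkc : ((k.toNat : Nat) : Int) = k := Int.toNat_of_nonneg hk
      have hinv := pvLoopA_eq m0 n0 x0 y0 dx0 dy0 x0 y0 dx0 dy0 k.toNat 0
      simp only [List.range_zero, List.map_nil, List.append_nil] at hinv
      have hx0 : pvX m0 x0 dx0 0 = (x0, dx0) := rfl
      have hy0 : pvX n0 y0 dy0 0 = (y0, dy0) := rfl
      rw [hx0, hy0] at hinv
      rw [hkc] at hinv
      rw [hinv, hmax, pvAxisB_eq m0 x0 dx0 k.toNat, pvAxisB_eq n0 y0 dy0 k.toNat]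
      simp only [pvX, Nat.zero_add]
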